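-- pv_equiv track=rewrite | github.com/pratirvce/CKY | part1_hand_chart.py | cky_with_backpointers
-- ===== SOURCE A (Python) =====
-- def cky_with_backpointers(words, lexical_rules, binary_rules):
--     """
--     CKY that keeps duplicate non-terminals with different backpointers.
--     table[i][j] = list of (NT, backpointer_description)
--     """
--     n = len(words)
--     table = [[[] for _ in range(n + 1)] for _ in range(n + 1)]
--
--     for j in range(1, n + 1):
--         word = words[j - 1]
--         for nt in lexical_rules.get(word, []):
--             table[j - 1][j].append((nt, f"{nt} -> {word}"))
--
--         for i in range(j - 2, -1, -1):
--             for k in range(i + 1, j):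
--                 for (a, b, c) in binary_rules:
--                     for (b_nt, _) in table[i][k]:
--                         if b_nt == b:
--                             for (c_nt, _) in table[k][j]:
--                                 if c_nt == c:
--                                     bp = f"{a} -> {b}[{i},{k}] + {c}[{k},{j}]"
--                                     table[i][j].append((a, bp))
--     return table
-- ===== SOURCE B (Python) =====
-- def cky_with_backpointers(words, lexical_rules, binary_rules):
--     """
--     Same CKY chart, but each cell keeps a dict of non-terminal multiplicities:
--     a split whose child cell is empty is skipped in O(1) (A still scans all rules),
--     and each applicable rule is emitted as one multiplied block append instead of
--     scanning both child cells entry by entry.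
--     """
--     n = len(words)
--     table = [[[] for _ in range(n + 1)] for _ in range(n + 1)]
--     counts = [[{} for _ in range(n + 1)] for _ in range(n + 1)]
--
--     def add(i, j, nt, bp, m):
--         table[i][j].extend([(nt, bp)] * m)
--         counts[i][j][nt] = counts[i][j].get(nt, 0) + m
--
--     for j in range(1, n + 1):
--         word = words[j - 1]
--         for nt in lexical_rules.get(word, []):
--             add(j - 1, j, nt, f"{nt} -> {word}", 1)
--         for i in range(j - 2, -1, -1):
--             for k in range(i + 1, j):
--                 left = counts[i][k]
--                 if not left:
--                     continue
--                 right = counts[k][j]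
--                 if not right:
--                     continue
--                 for (a, b, c) in binary_rules:
--                     m = left.get(b, 0) * right.get(c, 0)
--                     if m:
--                         add(i, j, a, f"{a} -> {b}[{i},{k}] + {c}[{k},{j}]", m)
--     return table
-- ===== Notes on version B (the rewrite author's own statement) =====
-- stated objective: faster
-- what changed: Each chart cell additionally maintains a dict of non-terminal multiplicities, so splits with an empty child cell are skipped in O(1) instead of scanning all rules, and each applicable rule is emitted as one multiplied block append instead of scanning both child cells entry by entry.
import Mathlib
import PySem

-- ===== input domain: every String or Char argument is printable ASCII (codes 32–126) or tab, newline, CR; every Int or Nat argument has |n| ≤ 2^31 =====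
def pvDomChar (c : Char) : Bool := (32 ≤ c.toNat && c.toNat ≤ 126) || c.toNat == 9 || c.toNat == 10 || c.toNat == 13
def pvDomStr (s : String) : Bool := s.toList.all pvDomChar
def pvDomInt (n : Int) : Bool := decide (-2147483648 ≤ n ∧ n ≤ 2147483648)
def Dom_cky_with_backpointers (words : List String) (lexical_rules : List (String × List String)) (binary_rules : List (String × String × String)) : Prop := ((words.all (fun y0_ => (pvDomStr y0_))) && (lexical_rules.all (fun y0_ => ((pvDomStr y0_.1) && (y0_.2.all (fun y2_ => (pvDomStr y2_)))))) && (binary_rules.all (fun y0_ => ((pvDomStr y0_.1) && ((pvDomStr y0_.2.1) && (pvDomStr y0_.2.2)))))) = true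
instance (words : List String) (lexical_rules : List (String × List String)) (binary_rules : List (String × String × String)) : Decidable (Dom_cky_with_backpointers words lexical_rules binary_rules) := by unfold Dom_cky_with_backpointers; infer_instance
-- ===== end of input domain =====

-- ===== PORT A =====
-- B keeps per-cell multiplicity dicts: splits with an empty child cell are skipped, and each
-- binary rule is applied by one multiplication instead of scanning both child cells (faster).

-- shared helpers: 2-D list access exactly as Python's table[i][j] read/assignment
def pvGet2 {a : Type} (t : List (List a)) (i j : Nat) (d : a) : a := (t.getD i []).getD j d
def pvSet2 {a : Type} (t : List (List a)) (i j : Nat) (v : a) : List (List a) :=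
  t.set i ((t.getD i []).set j v)
def pvAppendCell (t : List (List (List (String × String)))) (i j : Nat)
    (xs : List (String × String)) : List (List (List (String × String))) :=
  pvSet2 t i j (pvGet2 t i j [] ++ xs)
def pvLexBP (nt word : String) : String := nt ++ " -> " ++ word
def pvBinBP (a b c : String) (i k j : Nat) : String :=
  a ++ " -> " ++ b ++ "[" ++ toString i ++ "," ++ toString k ++ "] + " ++
    c ++ "[" ++ toString k ++ "," ++ toString j ++ "]"

def cky_with_backpointers (words : List String) (lexical_rules : List (String × List String)) (binary_rules : List (String × String × String)) : List (List (List (String × String))) :=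
  let n := words.length
  let table0 : List (List (List (String × String))) :=
    List.replicate (n + 1) (List.replicate (n + 1) [])
  (List.range n).foldl (fun table j0 =>
    let j := j0 + 1
    let word := words.getD (j - 1) ""
    let table := ((List.lookup word lexical_rules).getD []).foldl
      (fun t nt => pvAppendCell t (j - 1) j [(nt, pvLexBP nt word)]) table
    ((List.range (j - 1)).reverse).foldl (fun table i =>
      ((List.range (j - 1 - i)).map (fun d => i + 1 + d)).foldl (fun table k =>
        binary_rules.foldl (fun table r =>
          (pvGet2 table i k []).foldl (fun table be =>
            if be.1 == r.2.1 then
              (pvGet2 table k j []).foldl (fun table ce =>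
                if ce.1 == r.2.2 then
                  pvAppendCell table i j [(r.1, pvBinBP r.1 r.2.1 r.2.2 i k j)]
                else table) table
            else table) table) table) table) table) table0

-- ===== PORT B =====
def pvGetCnt (c : List (List (PySem.Dict String Int))) (i j : Nat) : PySem.Dict String Int :=
  pvGet2 c i j PySem.Dict.empty
-- B's add(i, j, nt, bp, m): extend the cell with m copies and bump the count dict
def pvAdd (st : List (List (List (String × String))) × List (List (PySem.Dict String Int)))
    (i j : Nat) (nt bp : String) (m : Int) :
    List (List (List (String × String))) × List (List (PySem.Dict String Int)) :=
  (pvAppendCell st.1 i j (List.replicate m.toNat (nt, bp)),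
   pvSet2 st.2 i j ((pvGetCnt st.2 i j).insert nt ((pvGetCnt st.2 i j).getD nt 0 + m)))

def cky_with_backpointers_alt (words : List String) (lexical_rules : List (String × List String)) (binary_rules : List (String × String × String)) : List (List (List (String × String))) :=
  let n := words.length
  let st0 : List (List (List (String × String))) × List (List (PySem.Dict String Int)) :=
    (List.replicate (n + 1) (List.replicate (n + 1) []),
     List.replicate (n + 1) (List.replicate (n + 1) PySem.Dict.empty))
  ((List.range n).foldl (fun st j0 =>
    let j := j0 + 1
    let word := words.getD (j - 1) ""
    let st := ((List.lookup word lexical_rules).getD []).foldl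
      (fun st nt => pvAdd st (j - 1) j nt (pvLexBP nt word) 1) st
    ((List.range (j - 1)).reverse).foldl (fun st i =>
      ((List.range (j - 1 - i)).map (fun d => i + 1 + d)).foldl (fun st k =>
        let left := pvGetCnt st.2 i k
        if left.size == 0 then st
        else
          let right := pvGetCnt st.2 k j
          if right.size == 0 then st
          else
            binary_rules.foldl (fun st r =>
              let m := left.getD r.2.1 0 * right.getD r.2.2 0
              if m ≠ 0 then pvAdd st i j r.1 (pvBinBP r.1 r.2.1 r.2.2 i k j) m else st)
              st) st) st) st0).1

-- ===== PRECONDITION & SPEC =====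
def Spec_cky_with_backpointers (words : List String) (lexical_rules : List (String × List String)) (binary_rules : List (String × String × String)) (out : List (List (List (String × String)))) : Prop := out = cky_with_backpointers_alt words lexical_rules binary_rules
instance (words : List String) (lexical_rules : List (String × List String)) (binary_rules : List (String × String × String)) (out : List (List (List (String × String)))) : Decidable (Spec_cky_with_backpointers words lexical_rules binary_rules out) := by unfold Spec_cky_with_backpointers; infer_instance

-- ===== CLAIM (what is proved, stated in full; the proofs are below) =====
def Claim_equal_cky_with_backpointers : Prop := ∀ (words : List String) (lexical_rules : List (String × List String)) (binary_rules : List (String × String × String)), Dom_cky_with_backpointers words lexical_rules binary_rules → Spec_cky_with_backpointers words lexical_rules binary_rules (cky_with_backpointers words lexical_rules binary_rules)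

-- ===== LEMMAS AND PROOFS =====

-- B's count dicts agree with the multiplicity of each non-terminal in the matching cell,
-- and the count grid has the same shape as the table.
def pvGood (t : List (List (List (String × String)))) (c : List (List (PySem.Dict String Int))) : Prop :=
  c.length = t.length ∧ (∀ i, (c.getD i []).length = (t.getD i []).length) ∧
  ∀ i j nt, (pvGetCnt c i j).getD nt 0 =
    ((pvGet2 t i j []).countP (fun e => e.1 == nt) : Int)

lemma pvGetD_set {a : Type} (l : List a) (i i' : Nat) (v d : a) :
    (l.set i v).getD i' d = if i = i' ∧ i < l.length then v else l.getD i' d := by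
  simp [List.getD_eq_getElem?_getD, List.getElem?_set]
  split_ifs <;> (simp_all; try omega)

lemma pvSet_getD_self {a : Type} (l : List a) (i : Nat) (d : a) :
    l.set i (l.getD i d) = l := by
  by_cases h : i < l.length
  · simp [List.getD_eq_getElem?_getD, List.getElem?_eq_getElem h, List.set_getElem_self]
  · rw [List.set_eq_of_length_le (Nat.le_of_not_lt h)]

lemma pvGet2_set2 {a : Type} (t : List (List a)) (i j i' j' : Nat) (v d : a) :
    pvGet2 (pvSet2 t i j v) i' j' d =
      if i = i' ∧ j = j' ∧ i < t.length ∧ j < (t.getD i []).length then v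
      else pvGet2 t i' j' d := by
  unfold pvGet2 pvSet2
  rw [pvGetD_set]
  by_cases h1 : i = i' ∧ i < t.length
  · rw [if_pos h1]
    obtain ⟨rfl, hlen⟩ := h1
    rw [pvGetD_set]
    split_ifs <;> tauto
  · rw [if_neg h1, if_neg (by tauto)]

lemma pvSet2_len {a : Type} (t : List (List a)) (i j : Nat) (v : a) :
    (pvSet2 t i j v).length = t.length := by
  simp [pvSet2]

lemma pvSet2_row_len {a : Type} (t : List (List a)) (i j i' : Nat) (v : a) :
    ((pvSet2 t i j v).getD i' []).length = (t.getD i' []).length := by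
  unfold pvSet2
  rw [pvGetD_set]
  split_ifs with h
  · obtain ⟨rfl, _⟩ := h; simp
  · rfl

lemma pvSet2_get2_self {a : Type} (t : List (List a)) (i j : Nat) (d : a) :
    pvSet2 t i j (pvGet2 t i j d) = t := by
  unfold pvGet2 pvSet2
  rw [pvSet_getD_self, pvSet_getD_self]

lemma pvSet2_oob {a : Type} (t : List (List a)) (i j : Nat) (v : a)
    (h : ¬(i < t.length ∧ j < (t.getD i []).length)) :
    pvSet2 t i j v = t := by
  unfold pvSet2
  by_cases hi : i < t.length
  · have hj : (t.getD i []).length ≤ j := by omega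
    rw [List.set_eq_of_length_le hj, pvSet_getD_self]
  · rw [List.set_eq_of_length_le (Nat.le_of_not_lt hi)]

lemma pvSet2_set2 {a : Type} (t : List (List a)) (i j : Nat) (u v : a) :
    pvSet2 (pvSet2 t i j u) i j v = pvSet2 t i j v := by
  by_cases h : i < t.length ∧ j < (t.getD i []).length
  · have hrow : (pvSet2 t i j u).getD i [] = (t.getD i []).set j u := by
      unfold pvSet2; rw [pvGetD_set, if_pos ⟨rfl, h.1⟩]
    unfold pvSet2
    rw [List.set_set]
    unfold pvSet2 at hrow
    rw [hrow, List.set_set]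
  · rw [pvSet2_oob t i j u h, pvSet2_oob t i j v h]

lemma pvAppendCell_nil (t : List (List (List (String × String)))) (i j : Nat) :
    pvAppendCell t i j [] = t := by
  unfold pvAppendCell
  rw [List.append_nil, pvSet2_get2_self]

lemma pvAppendCell_append (t : List (List (List (String × String)))) (i j : Nat)
    (xs ys : List (String × String)) :
    pvAppendCell (pvAppendCell t i j xs) i j ys = pvAppendCell t i j (xs ++ ys) := by
  unfold pvAppendCell
  by_cases h : i < t.length ∧ j < (t.getD i []).length
  · rw [pvGet2_set2, if_pos ⟨rfl, rfl, h.1, h.2⟩, pvSet2_set2, List.append_assoc]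
  · rw [pvSet2_oob t i j _ h, pvSet2_oob t i j _ h, pvSet2_oob t i j _ h]

lemma pvGet2_appendCell_ne (t : List (List (List (String × String)))) (i j i' j' : Nat)
    (xs : List (String × String)) (h : i ≠ i' ∨ j ≠ j') :
    pvGet2 (pvAppendCell t i j xs) i' j' [] = pvGet2 t i' j' [] := by
  unfold pvAppendCell
  rw [pvGet2_set2, if_neg (by tauto)]

lemma pvCountP_replicate {a : Type} (n : Nat) (x : a) (p : a → Bool) :
    (List.replicate n x).countP p = if p x then n else 0 := by
  induction n with
  | zero => simp
  | succ n ih => rw [List.replicate_succ, List.countP_cons, ih]; split_ifs <;> simp_all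

-- the paired update of B's add(...) preserves the invariant against A's plain cell append
lemma pvAdd_good (t : List (List (List (String × String))))
    (c : List (List (PySem.Dict String Int))) (i j : Nat) (nt bp : String) (m : Int)
    (hm : 0 ≤ m) (hg : pvGood t c) :
    pvGood (pvAppendCell t i j (List.replicate m.toNat (nt, bp)))
      (pvSet2 c i j ((pvGetCnt c i j).insert nt ((pvGetCnt c i j).getD nt 0 + m))) := by
  obtain ⟨hlen, hrow, hcnt⟩ := hg
  refine ⟨?_, ?_, ?_⟩
  · rw [pvAppendCell, pvSet2_len, pvSet2_len, hlen]
  · intro i'; rw [pvAppendCell, pvSet2_row_len, pvSet2_row_len]; exact hrow i'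
  · intro i' j' nt'
    unfold pvGetCnt pvAppendCell
    unfold pvGetCnt at hcnt
    rw [pvGet2_set2, pvGet2_set2]
    by_cases h : i = i' ∧ j = j' ∧ i < t.length ∧ j < (t.getD i []).length
    · obtain ⟨rfl, rfl, h1, h2⟩ := h
      rw [if_pos ⟨rfl, rfl, show i < c.length by rw [hlen]; exact h1,
            show j < (c.getD i []).length by rw [hrow i]; exact h2⟩,
          if_pos ⟨rfl, rfl, h1, h2⟩]
      rw [PySem.Dict.getD_insert, List.countP_append, pvCountP_replicate]
      by_cases hnt : nt' = nt
      · subst hnt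
        rw [if_pos rfl, hcnt i j nt']
        simp only [beq_self_eq_true, if_pos]
        push_cast
        rw [Int.toNat_of_nonneg hm]
      · rw [if_neg hnt, hcnt i j nt']
        have : (((nt, bp)).1 == nt') = false := by
          simp only [beq_eq_false_iff_ne]; exact fun hc => hnt hc.symm
        simp [this]
    · have hc' : ¬(i = i' ∧ j = j' ∧ i < c.length ∧ j < (c.getD i []).length) := by
        rw [hlen, hrow i]; exact h
      rw [if_neg h, if_neg hc']
      exact hcnt i' j' nt'

-- A's innermost loop over the right-child cell appends one copy per matching entry
lemma pvCLoop (cs : List (String × String)) (t : List (List (List (String × String))))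
    (i j : Nat) (x : String × String) (cn : String) :
    cs.foldl (fun t ce => if ce.1 == cn then pvAppendCell t i j [x] else t) t
      = pvAppendCell t i j (List.replicate (cs.countP (fun e => e.1 == cn)) x) := by
  induction cs generalizing t with
  | nil =>
    rw [List.foldl_nil, List.countP_nil, List.replicate_zero]
    exact (pvAppendCell_nil t i j).symm
  | cons ce cs ih =>
    rw [List.foldl_cons, List.countP_cons]
    by_cases h : (ce.1 == cn) = true
    · rw [if_pos h, ih, pvAppendCell_append]
      congr 1
      rw [h, if_pos rfl, Nat.add_comm, List.replicate_add]
      rfl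
    · have h' : (ce.1 == cn) = false := by simpa using h
      rw [if_neg h, ih, h']
      simp

-- A's middle loop: one rule application appends count_b * count_c copies
lemma pvBLoop (bs : List (String × String)) (t : List (List (List (String × String))))
    (i j k : Nat) (x : String × String) (bn cn : String) (hki : k ≠ i) :
    bs.foldl (fun t be => if be.1 == bn then
        (pvGet2 t k j []).foldl
          (fun t ce => if ce.1 == cn then pvAppendCell t i j [x] else t) t
      else t) t
    = pvAppendCell t i j (List.replicate
        ((bs.countP (fun e => e.1 == bn)) * ((pvGet2 t k j []).countP (fun e => e.1 == cn))) x) := by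
  induction bs generalizing t with
  | nil =>
    rw [List.foldl_nil, List.countP_nil, Nat.zero_mul, List.replicate_zero]
    exact (pvAppendCell_nil t i j).symm
  | cons be bs ih =>
    rw [List.foldl_cons, List.countP_cons]
    by_cases h : (be.1 == bn) = true
    · rw [if_pos h, pvCLoop, ih,
        pvGet2_appendCell_ne t i j k j _ (Or.inl (Ne.symm hki)),
        pvAppendCell_append, ← List.replicate_add]
      congr 1
      rw [h, if_pos rfl]
      ring_nf
    · have h' : (be.1 == bn) = false := by simpa using h
      rw [if_neg h, ih, h']
      simp

-- relational fold: an invariant preserved by paired steps is preserved by paired folds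
lemma pvFoldl_inv {α σ τ : Type} (R : σ → τ → Prop) (f : σ → α → σ) (g : τ → α → τ)
    (l : List α) (h : ∀ a ∈ l, ∀ s t, R s t → R (f s a) (g t a)) :
    ∀ s t, R s t → R (l.foldl f s) (l.foldl g t) := by
  induction l with
  | nil => intro s t hst; simpa using hst
  | cons a l ih =>
    intro s t hst
    exact ih (fun b hb s t hst => h b (List.mem_cons_of_mem _ hb) s t hst) _ _
      (h a List.mem_cons_self s t hst)

-- the invariant holds for the freshly initialised grids
lemma pvGood_init (n : Nat) :
    pvGood (List.replicate (n + 1) (List.replicate (n + 1) []))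
      (List.replicate (n + 1) (List.replicate (n + 1) PySem.Dict.empty)) := by
  refine ⟨by simp, ?_, ?_⟩
  · intro i
    by_cases h : i < n + 1 <;>
      simp [List.getD_eq_getElem?_getD, h]
  · intro i j nt
    unfold pvGetCnt pvGet2
    by_cases hi : i < n + 1 <;> by_cases hj : j < n + 1 <;>
      simp [List.getD_eq_getElem?_getD, hi, hj, PySem.Dict.getD_empty]

-- a fold whose step fixes the start state is the identity
lemma pvFoldl_fixed {α σ : Type} (f : σ → α → σ) (s : σ) (l : List α)
    (h : ∀ a, f s a = s) : l.foldl f s = s := by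
  induction l with
  | nil => rfl
  | cons a l ih => rw [List.foldl_cons, h a]; exact ih

-- an empty count dict means the matching cell is empty
lemma pvCellEmpty (t : List (List (List (String × String))))
    (c : List (List (PySem.Dict String Int))) (i k : Nat)
    (hg : pvGood t c) (h : (pvGetCnt c i k).size = 0) : pvGet2 t i k [] = [] := by
  have hempty : pvGetCnt c i k = PySem.Dict.empty := by
    apply PySem.Dict.ext
    have : (pvGetCnt c i k).items.length = 0 := h
    simpa [PySem.Dict.empty] using List.length_eq_zero_iff.mp this
  cases hcell : pvGet2 t i k [] with
  | nil => rfl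
  | cons e rest =>
    exfalso
    have := hg.2.2 i k e.1
    rw [hempty, PySem.Dict.getD_empty, hcell] at this
    have hpos : 0 < (e :: rest).countP (fun x => x.1 == e.1) := by
      rw [List.countP_cons]
      simp
    omega

def pvR (s : List (List (List (String × String))))
    (st : List (List (List (String × String))) × List (List (PySem.Dict String Int))) : Prop :=
  s = st.1 ∧ pvGood st.1 st.2

-- one binary-rule step: A's scan equals B's multiplied block append, invariant and
-- snapshot dicts preserved
lemma pvRuleStep (i j k : Nat) (hik : i < k) (hkj : k < j)
    (r : String × String × String)
    (s : List (List (List (String × String))))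
    (st : List (List (List (String × String))) × List (List (PySem.Dict String Int)))
    (left right : PySem.Dict String Int)
    (hst : pvR s st ∧ left = pvGetCnt st.2 i k ∧ right = pvGetCnt st.2 k j) :
    (pvR
      ((pvGet2 s i k []).foldl (fun s be =>
        if be.1 == r.2.1 then
          (pvGet2 s k j []).foldl (fun s ce =>
            if ce.1 == r.2.2 then pvAppendCell s i j [(r.1, pvBinBP r.1 r.2.1 r.2.2 i k j)]
            else s) s
        else s) s)
      (if (left.getD r.2.1 0 * right.getD r.2.2 0) ≠ 0 then
        pvAdd st i j r.1 (pvBinBP r.1 r.2.1 r.2.2 i k j)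
          (left.getD r.2.1 0 * right.getD r.2.2 0)
      else st)) ∧
    left = pvGetCnt (if (left.getD r.2.1 0 * right.getD r.2.2 0) ≠ 0 then
        pvAdd st i j r.1 (pvBinBP r.1 r.2.1 r.2.2 i k j)
          (left.getD r.2.1 0 * right.getD r.2.2 0)
      else st).2 i k ∧
    right = pvGetCnt (if (left.getD r.2.1 0 * right.getD r.2.2 0) ≠ 0 then
        pvAdd st i j r.1 (pvBinBP r.1 r.2.1 r.2.2 i k j)
          (left.getD r.2.1 0 * right.getD r.2.2 0)
      else st).2 k j := by
  obtain ⟨⟨rfl, hg⟩, hL, hR⟩ := hst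
  have hb : left.getD r.2.1 0
      = ((pvGet2 st.1 i k []).countP (fun e => e.1 == r.2.1) : Int) := by
    rw [hL]; exact (hg.2.2) i k r.2.1
  have hc : right.getD r.2.2 0
      = ((pvGet2 st.1 k j []).countP (fun e => e.1 == r.2.2) : Int) := by
    rw [hR]; exact (hg.2.2) k j r.2.2
  set mb := (pvGet2 st.1 i k []).countP (fun e => e.1 == r.2.1) with hmb
  set mc := (pvGet2 st.1 k j []).countP (fun e => e.1 == r.2.2) with hmc
  have hA : (pvGet2 st.1 i k []).foldl (fun s be =>
        if be.1 == r.2.1 then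
          (pvGet2 s k j []).foldl (fun s ce =>
            if ce.1 == r.2.2 then pvAppendCell s i j [(r.1, pvBinBP r.1 r.2.1 r.2.2 i k j)]
            else s) s
        else s) st.1
      = pvAppendCell st.1 i j (List.replicate (mb * mc) (r.1, pvBinBP r.1 r.2.1 r.2.2 i k j)) :=
    pvBLoop _ _ i j k _ _ _ (by omega)
  have hm : left.getD r.2.1 0 * right.getD r.2.2 0 = ((mb * mc : Nat) : Int) := by
    rw [hb, hc]; push_cast; ring_nf
  by_cases hz : left.getD r.2.1 0 * right.getD r.2.2 0 ≠ 0
  · rw [if_pos hz]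
    have htn : (left.getD r.2.1 0 * right.getD r.2.2 0).toNat = mb * mc := by
      rw [hm]; exact Int.toNat_natCast _
    refine ⟨⟨?_, ?_⟩, ?_, ?_⟩
    · rw [hA]; simp only [pvAdd, htn]
    · have := pvAdd_good st.1 st.2 i j r.1 (pvBinBP r.1 r.2.1 r.2.2 i k j)
        (left.getD r.2.1 0 * right.getD r.2.2 0)
        (by rw [hm]; exact Int.natCast_nonneg _) hg
      simpa [pvAdd, htn] using this
    · rw [hL]
      simp only [pvAdd]
      unfold pvGetCnt
      rw [pvGet2_set2, if_neg (by omega)]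
    · rw [hR]
      simp only [pvAdd]
      unfold pvGetCnt
      rw [pvGet2_set2, if_neg (by omega)]
  · rw [if_neg hz]
    rw [Decidable.not_not] at hz
    have hmc0 : mb * mc = 0 := by
      have h0 : ((mb * mc : Nat) : Int) = 0 := by rw [← hm]; exact hz
      exact_mod_cast h0
    exact ⟨⟨by rw [hA, hmc0, List.replicate_zero]; exact pvAppendCell_nil st.1 i j, hg⟩, hL, hR⟩

-- one split point k: B skips the rule loop when a child cell is empty; A's scans do nothing there
lemma pvKStep (i j k : Nat) (hik : i < k) (hkj : k < j)
    (binary_rules : List (String × String × String))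
    (s : List (List (List (String × String))))
    (st : List (List (List (String × String))) × List (List (PySem.Dict String Int)))
    (hst : pvR s st) :
    pvR
      (binary_rules.foldl (fun s r =>
        (pvGet2 s i k []).foldl (fun s be =>
          if be.1 == r.2.1 then
            (pvGet2 s k j []).foldl (fun s ce =>
              if ce.1 == r.2.2 then pvAppendCell s i j [(r.1, pvBinBP r.1 r.2.1 r.2.2 i k j)]
              else s) s
          else s) s) s)
      (if (pvGetCnt st.2 i k).size == 0 then st
       else if (pvGetCnt st.2 k j).size == 0 then st
       else binary_rules.foldl (fun st' r =>
          if ((pvGetCnt st.2 i k).getD r.2.1 0 * (pvGetCnt st.2 k j).getD r.2.2 0) ≠ 0 then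
            pvAdd st' i j r.1 (pvBinBP r.1 r.2.1 r.2.2 i k j)
              ((pvGetCnt st.2 i k).getD r.2.1 0 * (pvGetCnt st.2 k j).getD r.2.2 0)
          else st') st) := by
  obtain ⟨rfl, hg⟩ := hst
  by_cases hL0 : (pvGetCnt st.2 i k).size = 0
  · rw [if_pos (by simpa using hL0)]
    have hcell := pvCellEmpty st.1 st.2 i k hg hL0
    refine ⟨?_, hg⟩
    apply pvFoldl_fixed
    intro r
    rw [hcell, List.foldl_nil]
  · rw [if_neg (by simpa using hL0)]
    by_cases hR0 : (pvGetCnt st.2 k j).size = 0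
    · rw [if_pos (by simpa using hR0)]
      have hcell := pvCellEmpty st.1 st.2 k j hg hR0
      refine ⟨?_, hg⟩
      apply pvFoldl_fixed
      intro r
      rw [pvBLoop _ _ i j k _ _ _ (by omega), hcell, List.countP_nil, Nat.mul_zero,
        List.replicate_zero]
      exact pvAppendCell_nil st.1 i j
    · rw [if_neg (by simpa using hR0)]
      refine (pvFoldl_inv
        (fun s st' => pvR s st' ∧ pvGetCnt st.2 i k = pvGetCnt st'.2 i k
          ∧ pvGetCnt st.2 k j = pvGetCnt st'.2 k j) _ _ binary_rules
        ?_ st.1 st ⟨⟨rfl, hg⟩, rfl, rfl⟩).1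
      intro r _ s st' hst'
      exact pvRuleStep i j k hik hkj r s st' _ _ hst'

-- ===== VERDICT (by name: the statement is the Claim_ definition above) =====
theorem cky_with_backpointers_spec : Claim_equal_cky_with_backpointers := by
  intro words lexical_rules binary_rules _
  unfold Spec_cky_with_backpointers
  simp only [cky_with_backpointers, cky_with_backpointers_alt]
  refine (pvFoldl_inv pvR _ _ (List.range words.length) ?_
    (List.replicate (words.length + 1) (List.replicate (words.length + 1) []))
    (List.replicate (words.length + 1) (List.replicate (words.length + 1) []),
      List.replicate (words.length + 1) (List.replicate (words.length + 1) PySem.Dict.empty))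
    ⟨rfl, pvGood_init words.length⟩).1
  intro j0 hj0 s st hst
  refine pvFoldl_inv pvR _ _ _ ?_ _ _ (pvFoldl_inv pvR _ _ _ ?_ _ _ hst)
  · -- i loop step
    intro i hi s st hst
    have hi' : i < j0 + 1 - 1 := List.mem_range.mp (List.mem_reverse.mp hi)
    try dsimp only
    refine pvFoldl_inv pvR _ _ _ ?_ _ _ hst
    -- k loop step
    intro k hk s st hst
    obtain ⟨d, hd, rfl⟩ := List.mem_map.mp hk
    have hd' : d < j0 + 1 - 1 - i := List.mem_range.mp hd
    try dsimp only
    have h1 : i < i + 1 + d := by omega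
    have h2 : i + 1 + d < j0 + 1 := by omega
    exact pvKStep i (j0 + 1) (i + 1 + d) h1 h2 binary_rules s st hst
  · -- lexical step
    intro nt _ s st hst
    obtain ⟨rfl, hg⟩ := hst
    have h1 := pvAdd_good st.1 st.2 (j0 + 1 - 1) (j0 + 1) nt
      (pvLexBP nt (words.getD (j0 + 1 - 1) "")) 1 (by norm_num) hg
    constructor
    · simp [pvAdd]
    · simpa [pvAdd] using h1
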